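-- pv_equiv track=rewrite | github.com/Dandastico/final-proj_CS50P | webscrapper.py | count_names
-- ===== SOURCE A (Python) =====
-- def count_names(names_set):
--     '''
--     Count number of congresspeople with the same first name
--     Return a dictionary with name as key and count as value
--     '''
--     names_count = {}
--     for full_names in names_set:
--         # betting that the first substring is the first name
--         first_name = full_names.split()[0]
--         # if first name is already a key, add one. If note, create the key
--         if first_name in names_count:
--             names_count[first_name] += 1
--         else:
--             names_count[first_name] = 1
--
--     return names_count
-- ===== SOURCE B (Python) =====
-- def count_names(names_set):
--     '''
--     Count number of congresspeople with the same first name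
--     Return a dictionary with name as key and count as value
--     '''
--     # phase 1: extract all first names (raises IndexError on whitespace-only
--     # entries exactly like the original)
--     firsts = [full_names.split()[0] for full_names in names_set]
--     # phase 2: one entry per distinct first name (first-occurrence order),
--     # the value computed by counting occurrences in the extracted list
--     names_count = {}
--     for first_name in firsts:
--         if first_name not in names_count:
--             names_count[first_name] = firsts.count(first_name)
--     return names_count
-- ===== Notes on version B (the rewrite author's own statement) =====
-- stated objective: alternative
-- what changed: B replaces A's single-pass live hash tally (increment-or-initialise per element) with a two-phase scheme: extract the list of first names once, then create each distinct name's entry exactly once with its total computed by list.count.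
import Mathlib
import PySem

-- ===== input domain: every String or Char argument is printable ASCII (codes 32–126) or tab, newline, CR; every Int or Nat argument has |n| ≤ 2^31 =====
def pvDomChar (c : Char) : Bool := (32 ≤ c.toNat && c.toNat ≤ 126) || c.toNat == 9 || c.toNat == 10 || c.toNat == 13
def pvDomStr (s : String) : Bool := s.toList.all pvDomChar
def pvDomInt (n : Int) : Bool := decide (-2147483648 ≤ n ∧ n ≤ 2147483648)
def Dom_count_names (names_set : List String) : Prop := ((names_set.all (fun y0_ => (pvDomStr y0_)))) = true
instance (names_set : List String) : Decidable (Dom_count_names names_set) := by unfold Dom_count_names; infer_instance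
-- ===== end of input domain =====

-- B replaces A's single-pass live hash tally with a two-phase pass: extract all first
-- names once, then create each distinct name's entry once with its value computed by
-- list counting ("alternative": structurally different, not faster).


-- ===== PORT A =====
-- literal port of A: one pass, a live tally dict (increment existing key / create with 1)
def count_names (names_set : List String) : List (String × Int) :=
  (names_set.foldl (fun names_count full_names =>
      match PySem.List.pyGet? (PySem.Str.split₀ full_names) 0 with
      | none => names_count  -- split()[0] raises IndexError here; excluded by Pre_count_names
      | some first_name =>
        if names_count.contains first_name then
          names_count.insert first_name (names_count.getD first_name 0 + 1)
        else
          names_count.insert first_name 1)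
    PySem.Dict.empty).items

-- ===== PORT B =====
-- literal port of B: extract the first names, then one entry per distinct name valued by list count
def count_names_alt (names_set : List String) : List (String × Int) :=
  -- none = IndexError from split()[0] in Python; excluded by Pre_count_names
  let firsts := names_set.filterMap (fun s => PySem.List.pyGet? (PySem.Str.split₀ s) 0)
  (firsts.foldl (fun names_count first_name =>
      if names_count.contains first_name then names_count
      else names_count.insert first_name ((firsts.count first_name : Int)))
    PySem.Dict.empty).items

-- ===== PRECONDITION & SPEC =====
-- Pre_ excludes exactly the inputs on which A raises IndexError: lists containing a
-- whitespace-only (or empty) string, where full_names.split() is empty.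
def Pre_count_names (names_set : List String) : Prop :=
  ∀ s ∈ names_set, PySem.Str.split₀ s ≠ []
instance (names_set : List String) : Decidable (Pre_count_names names_set) := by
  unfold Pre_count_names; infer_instance

def pvWitness_count_names : List String := ["John Smith", "Jane Doe", "John Q"]

def Spec_count_names (names_set : List String) (out : List (String × Int)) : Prop := out = count_names_alt names_set
instance (names_set : List String) (out : List (String × Int)) : Decidable (Spec_count_names names_set out) := by unfold Spec_count_names; infer_instance

-- ===== CLAIM (what is proved, stated in full; the proofs are below) =====
def Claim_equal_count_names : Prop := ∀ (names_set : List String), Dom_count_names names_set → Pre_count_names names_set → Spec_count_names names_set (count_names names_set)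

-- ===== LEMMAS AND PROOFS =====

theorem getD_zero_of_contains_false (d : PySem.Dict String Int) (f : String)
    (h : d.contains f = false) : d.getD f 0 = 0 := by
  cases hf : List.find? (fun p => p.1 == f) d.items with
  | none => simp [PySem.Dict.getD, PySem.Dict.get?, hf]
  | some p =>
    exfalso
    have hm := List.mem_of_find?_eq_some hf
    have hp := List.find?_some hf
    simp [PySem.Dict.contains, List.any_eq_false] at h
    obtain ⟨p1, p2⟩ := p
    exact h p1 p2 hm (by simpa using hp)

-- A's branching step is an insert-with-getD+1 in both branches
theorem A_step_eq (d : PySem.Dict String Int) (f : String) :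
    (if d.contains f then d.insert f (d.getD f 0 + 1) else d.insert f 1)
      = d.insert f (d.getD f 0 + 1) := by
  by_cases h : d.contains f
  · simp [h]
  · simp only [Bool.not_eq_true] at h
    simp [h, getD_zero_of_contains_false d f h]

-- under Pre_, A's fold over names_set is the counting fold over the extracted first names
theorem A_fold_eq (names : List String) (h : ∀ s ∈ names, PySem.Str.split₀ s ≠ [])
    (d : PySem.Dict String Int) :
    names.foldl (fun names_count full_names =>
      match PySem.List.pyGet? (PySem.Str.split₀ full_names) 0 with
      | none => names_count
      | some first_name =>
        if names_count.contains first_name then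
          names_count.insert first_name (names_count.getD first_name 0 + 1)
        else
          names_count.insert first_name 1) d
      = (names.filterMap (fun s => PySem.List.pyGet? (PySem.Str.split₀ s) 0)).foldl
          (fun nc f => nc.insert f (nc.getD f 0 + 1)) d := by
  induction names generalizing d with
  | nil => rfl
  | cons s t ih =>
    have hs : PySem.Str.split₀ s ≠ [] := h s (by simp)
    cases hsp : PySem.Str.split₀ s with
    | nil => exact absurd hsp hs
    | cons a rest =>
      have hget : PySem.List.pyGet? (PySem.Str.split₀ s) 0 = some a := by
        simp [hsp, PySem.List.pyGet?, PySem.List.pyIdx?]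
      simp only [List.foldl_cons, List.filterMap_cons, hget]
      rw [A_step_eq]
      exact ih (fun x hx => h x (by simp [hx])) _

-- B's fold: starting from a dict whose items are its (Nodup) keys valued by g,
-- the insert-if-fresh fold produces the Set.update of the keys, valued by g
theorem B_fold_items (g : String → Int) (l : List String) :
    ∀ (d : PySem.Dict String Int),
      d.items = d.keys.map (fun k => (k, g k)) → d.keys.Nodup →
      (l.foldl (fun nc f => if nc.contains f then nc else nc.insert f (g f)) d).items
        = (PySem.Set.update d.keys l).map (fun k => (k, g k)) := by
  induction l with
  | nil => intro d hitems _; simpa [PySem.Set.update] using hitems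
  | cons f t ih =>
    intro d hitems hnd
    have hkc : d.keys.contains f = true ↔ d.contains f = true := by
      simp [PySem.Dict.keys, PySem.Dict.contains, List.any_eq_true]
    by_cases h : d.contains f
    · have hmem : d.keys.contains f = true := hkc.mpr h
      have hfmem : f ∈ d.keys := by simpa using hmem
      have hadd : PySem.Set.add d.keys f = d.keys := by
        simp [PySem.Set.add, hfmem]
      simp only [List.foldl_cons, PySem.Set.update, hadd, h, if_true]
      exact ih d hitems hnd
    · simp only [Bool.not_eq_true] at h
      have hmem : d.keys.contains f = false := by
        cases hb : d.keys.contains f with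
        | false => rfl
        | true => exact absurd (hkc.mp hb) (by simp [h])
      have hnotmem : f ∉ d.keys := by simpa using hmem
      have hins : (d.insert f (g f)).items = d.items ++ [(f, g f)] := by
        simp [PySem.Dict.insert, h]
      have hkeys : (d.insert f (g f)).keys = d.keys ++ [f] := by
        simp [PySem.Dict.keys, hins]
      have hadd : PySem.Set.add d.keys f = d.keys ++ [f] := by
        simp [PySem.Set.add, hnotmem]
      simp only [List.foldl_cons, PySem.Set.update, hadd, h]
      have := ih (d.insert f (g f))
        (by simp [hins, hkeys, hitems])
        (by simp [hkeys, List.nodup_append, hnd]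
            exact fun a ha he => hnotmem (he ▸ ha))
      rw [hkeys] at this
      simpa [PySem.Set.update] using this

-- ===== VERDICT (by name: the statement is the Claim_ definition above) =====
theorem count_names_spec : Claim_equal_count_names := by
  intro names _dom hpre
  show count_names names = count_names_alt names
  unfold count_names count_names_alt
  rw [A_fold_eq names hpre]
  rw [PySem.Dict.foldl_insert_getD_add_one_eq_counter, PySem.Dict.items_counter]
  rw [B_fold_items _ _ PySem.Dict.empty (by simp [PySem.Dict.empty, PySem.Dict.keys])
        (by simp [PySem.Dict.empty, PySem.Dict.keys])]
  simp [PySem.Dict.empty, PySem.Dict.keys, PySem.Set.update, PySem.Set.ofList,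
    PySem.Set.empty, List.count]
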